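-- pv_equiv track=rewrite | github.com/ongyiumark/programming-problems | ProgVar.Fun Sets/Sums and Asymptotics/CF1151C - Problem for Nazar.py | solve
-- ===== SOURCE A (Python) =====
-- MOD = 10**9+7
--
-- def first_set(l, r):
--     if r < l:
--         return 0
--     l %= MOD
--     r %= MOD
--
--     res = r*r - (l-1)*(l-1)
--     res %= MOD
--     if res < 0:
--         res += MOD
--
--     return res
--
-- def second_set(l, r):
--     if r < l:
--         return 0
--     l %= MOD
--     r %= MOD
--
--     res = r*(r+1) - (l-1)*l
--     res %= MOD
--     if res < 0:
--         res += MOD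
--     return res
--
-- def solve(n):
--     prev_1, curr_1 = 1, 1
--     prev_2, curr_2 = 1, 1
--
--     total = 0
--     cnt = 1
--     set_id = 0
--     while n >= cnt:
--         if set_id == 0:
--             # first set
--             curr_1 = prev_1 + cnt-1
--             total += first_set(prev_1, curr_1)
--             total %= MOD
--             prev_1 = curr_1+1
--         else:
--             # second set
--             curr_2 = prev_2 + cnt-1
--             total += second_set(prev_2, curr_2)
--             total %= MOD
--             prev_2 = curr_2+1
--
--         n -= cnt
--         cnt *= 2
--         set_id = 1-set_id
--
--     if set_id == 0:
--         total += first_set(prev_1, prev_1+n-1)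
--     else:
--         total += second_set(prev_2, prev_2+n-1)
--     total %= MOD
--
--
--     return total
-- ===== SOURCE B (Python) =====
-- MOD = 10**9+7
--
-- def solve(n):
--     # Count how many elements of the odd sequence (c1) and even sequence (c2)
--     # have been emitted, using the same doubling-block loop; then use the
--     # closed forms sum of first k odds = k^2, sum of first k evens = k(k+1).
--     c1, c2 = 0, 0
--     cnt = 1
--     odd = True
--     while n >= cnt:
--         if odd:
--             c1 += cnt
--         else:
--             c2 += cnt
--         n -= cnt
--         cnt *= 2
--         odd = not odd
--     if n > 0:
--         if odd:
--             c1 += n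
--         else:
--             c2 += n
--     k1 = c1 % MOD
--     k2 = c2 % MOD
--     return (k1*k1 + k2*(k2+1)) % MOD
-- ===== Notes on version B (the rewrite author's own statement) =====
-- stated objective: simpler
-- what changed: Replaced the per-block modular partial-sum helpers first_set/second_set and the running total by two plain element counters maintained in the same doubling loop, with the answer computed once at the end from the closed forms k^2 (sum of first k odds) and k(k+1) (sum of first k evens).
import Mathlib
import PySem

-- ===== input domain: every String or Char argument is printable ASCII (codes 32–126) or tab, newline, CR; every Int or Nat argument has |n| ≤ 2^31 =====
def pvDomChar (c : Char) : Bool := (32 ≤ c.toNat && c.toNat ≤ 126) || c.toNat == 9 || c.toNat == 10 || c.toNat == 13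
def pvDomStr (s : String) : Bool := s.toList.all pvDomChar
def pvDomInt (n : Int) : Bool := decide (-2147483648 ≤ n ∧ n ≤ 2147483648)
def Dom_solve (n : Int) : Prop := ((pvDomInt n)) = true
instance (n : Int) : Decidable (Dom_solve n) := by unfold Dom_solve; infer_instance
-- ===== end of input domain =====

-- B keeps A's doubling block loop but maintains only the two element counts and
-- finishes with the closed forms k^2 and k(k+1) instead of per-block partial sums
-- (objective: simpler; return value only, no side effects involved).

-- ===== PORT A =====
def pvMOD : Int := 1000000007

def firstSet (l r : Int) : Int :=
  if r < l then 0
  else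
    let l := PySem.Int.mod l pvMOD
    let r := PySem.Int.mod r pvMOD
    let res := r * r - (l - 1) * (l - 1)
    let res := PySem.Int.mod res pvMOD
    if res < 0 then res + pvMOD else res

def secondSet (l r : Int) : Int :=
  if r < l then 0
  else
    let l := PySem.Int.mod l pvMOD
    let r := PySem.Int.mod r pvMOD
    let res := r * (r + 1) - (l - 1) * l
    let res := PySem.Int.mod res pvMOD
    if res < 0 then res + pvMOD else res

-- the code after the while loop (total += …; total %= MOD; return total)
def exitA (prev1 prev2 total setid n : Int) : Int :=
  PySem.Int.mod
    (if setid = 0 then total + firstSet prev1 (prev1 + n - 1)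
     else total + secondSet prev2 (prev2 + n - 1)) pvMOD

-- the while loop, fuel only makes the recursion structural (never exhausted for
-- the fuel solve supplies); curr_1/curr_2 = prev+cnt-1 are inlined
def loopA (fuel : Nat) (prev1 prev2 total cnt setid n : Int) : Int :=
  match fuel with
  | 0 => exitA prev1 prev2 total setid n
  | f + 1 =>
      if cnt ≤ n then
        if setid = 0 then
          loopA f (prev1 + cnt - 1 + 1) prev2
            (PySem.Int.mod (total + firstSet prev1 (prev1 + cnt - 1)) pvMOD)
            (cnt * 2) (1 - setid) (n - cnt)
        else
          loopA f prev1 (prev2 + cnt - 1 + 1)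
            (PySem.Int.mod (total + secondSet prev2 (prev2 + cnt - 1)) pvMOD)
            (cnt * 2) (1 - setid) (n - cnt)
      else exitA prev1 prev2 total setid n

def solve (n : Int) : Int := loopA (n.toNat + 1) 1 1 0 1 0 n

-- ===== PORT B =====
-- the code after B's while loop: add the remaining n to the current counter
def exitB (c1 c2 : Int) (odd : Bool) (n : Int) : Int × Int :=
  if 0 < n then (if odd then (c1 + n, c2) else (c1, c2 + n)) else (c1, c2)

def loopB (fuel : Nat) (c1 c2 cnt : Int) (odd : Bool) (n : Int) : Int × Int :=
  match fuel with
  | 0 => exitB c1 c2 odd n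
  | f + 1 =>
      if cnt ≤ n then
        if odd then loopB f (c1 + cnt) c2 (cnt * 2) (!odd) (n - cnt)
        else loopB f c1 (c2 + cnt) (cnt * 2) (!odd) (n - cnt)
      else exitB c1 c2 odd n

def solve_alt (n : Int) : Int :=
  let p := loopB (n.toNat + 1) 0 0 1 true n
  let k1 := PySem.Int.mod p.1 pvMOD
  let k2 := PySem.Int.mod p.2 pvMOD
  PySem.Int.mod (k1 * k1 + k2 * (k2 + 1)) pvMOD

-- ===== PRECONDITION & SPEC =====
def Spec_solve (n : Int) (out : Int) : Prop := out = solve_alt n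
instance (n : Int) (out : Int) : Decidable (Spec_solve n out) := by unfold Spec_solve; infer_instance

-- ===== CLAIM (what is proved, stated in full; the proofs are below) =====
def Claim_equal_solve : Prop := ∀ (n : Int), Dom_solve n → Spec_solve n (solve n)

-- ===== LEMMAS AND PROOFS =====

theorem pvmod_emod (a : Int) : PySem.Int.mod a pvMOD = a % pvMOD :=
  PySem.Int.mod_eq_emod_of_pos (by norm_num [pvMOD])

theorem hm (x : Int) : (x % pvMOD) ≡ x [ZMOD pvMOD] :=
  Int.emod_emod_of_dvd x dvd_rfl

-- B's closed-form finish applied to a counter pair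
def finB (p : Int × Int) : Int :=
  (p.1 % pvMOD * (p.1 % pvMOD) + p.2 % pvMOD * (p.2 % pvMOD + 1)) % pvMOD

theorem solve_alt_eq (n : Int) : solve_alt n = finB (loopB (n.toNat + 1) 0 0 1 true n) := by
  simp [solve_alt, finB, pvmod_emod]

theorem fs_modeq (l r : Int) (h : l ≤ r) :
    firstSet l r ≡ r * r - (l - 1) * (l - 1) [ZMOD pvMOD] := by
  unfold firstSet
  rw [if_neg (not_lt.mpr h)]
  simp only [pvmod_emod]
  rw [if_neg (not_lt.mpr (Int.emod_nonneg _ (by norm_num [pvMOD])))]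
  exact (hm _).trans (((hm r).mul (hm r)).sub (((hm l).sub_right 1).mul ((hm l).sub_right 1)))

theorem ss_modeq (l r : Int) (h : l ≤ r) :
    secondSet l r ≡ r * (r + 1) - (l - 1) * l [ZMOD pvMOD] := by
  unfold secondSet
  rw [if_neg (not_lt.mpr h)]
  simp only [pvmod_emod]
  rw [if_neg (not_lt.mpr (Int.emod_nonneg _ (by norm_num [pvMOD])))]
  exact (hm _).trans (((hm r).mul ((hm r).add_right 1)).sub (((hm l).sub_right 1).mul (hm l)))

theorem fs_zero (l r : Int) (h : r < l) : firstSet l r = 0 := by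
  unfold firstSet; rw [if_pos h]

theorem ss_zero (l r : Int) (h : r < l) : secondSet l r = 0 := by
  unfold secondSet; rw [if_pos h]

theorem finB_modeq (c1 c2 : Int) :
    finB (c1, c2) = (c1 * c1 + c2 * (c2 + 1)) % pvMOD := by
  unfold finB
  exact (((hm c1).mul (hm c1)).add ((hm c2).mul ((hm c2).add_right 1)))

-- the invariant at loop exit: A's tail addition equals B's closed form
theorem exit_eq (c1 c2 n : Int) :
    (exitA (c1 + 1) (c2 + 1) ((c1 * c1 + c2 * (c2 + 1)) % pvMOD) 0 n = finB (exitB c1 c2 true n))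
    ∧ (exitA (c1 + 1) (c2 + 1) ((c1 * c1 + c2 * (c2 + 1)) % pvMOD) 1 n = finB (exitB c1 c2 false n)) := by
  constructor
  · unfold exitA exitB
    rw [if_pos rfl]
    by_cases hn : 0 < n
    · rw [if_pos hn, if_pos rfl, pvmod_emod, finB_modeq]
      have hfs := fs_modeq (c1 + 1) (c1 + 1 + n - 1) (by omega)
      have h1 : ((c1 * c1 + c2 * (c2 + 1)) % pvMOD) + firstSet (c1 + 1) (c1 + 1 + n - 1)
          ≡ (c1 + n) * (c1 + n) + c2 * (c2 + 1) [ZMOD pvMOD] := by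
        have := (hm (c1 * c1 + c2 * (c2 + 1))).add hfs
        calc ((c1 * c1 + c2 * (c2 + 1)) % pvMOD) + firstSet (c1 + 1) (c1 + 1 + n - 1)
            ≡ (c1 * c1 + c2 * (c2 + 1)) +
              ((c1 + 1 + n - 1) * (c1 + 1 + n - 1) - (c1 + 1 - 1) * (c1 + 1 - 1)) [ZMOD pvMOD] := this
          _ = (c1 + n) * (c1 + n) + c2 * (c2 + 1) := by ring
      exact h1
    · rw [if_neg hn, pvmod_emod, finB_modeq,
          fs_zero (c1 + 1) (c1 + 1 + n - 1) (by omega), add_zero]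
      exact Int.emod_emod_of_dvd _ dvd_rfl
  · unfold exitA exitB
    rw [if_neg (one_ne_zero : (1:Int) ≠ 0)]
    simp only [Bool.false_eq_true, if_false]
    by_cases hn : 0 < n
    · rw [if_pos hn, pvmod_emod, finB_modeq]
      have hss := ss_modeq (c2 + 1) (c2 + 1 + n - 1) (by omega)
      calc ((c1 * c1 + c2 * (c2 + 1)) % pvMOD) + secondSet (c2 + 1) (c2 + 1 + n - 1)
          ≡ (c1 * c1 + c2 * (c2 + 1)) +
            ((c2 + 1 + n - 1) * ((c2 + 1 + n - 1) + 1) - (c2 + 1 - 1) * (c2 + 1)) [ZMOD pvMOD] :=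
            (hm _).add hss
        _ ≡ (c1 * c1 + (c2 + n) * ((c2 + n) + 1)) [ZMOD pvMOD] := by
            have : (c1 * c1 + c2 * (c2 + 1)) +
              ((c2 + 1 + n - 1) * ((c2 + 1 + n - 1) + 1) - (c2 + 1 - 1) * (c2 + 1))
              = c1 * c1 + (c2 + n) * ((c2 + n) + 1) := by ring
            rw [this]
    · rw [if_neg hn, pvmod_emod, finB_modeq,
          ss_zero (c2 + 1) (c2 + 1 + n - 1) (by omega), add_zero]
      exact Int.emod_emod_of_dvd _ dvd_rfl

-- the main invariant: A's loop state (prev = count+1, total = closed form mod) tracks B's counters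
theorem loop_eq (f : Nat) : ∀ (cnt n c1 c2 : Int), 1 ≤ cnt →
    (loopA f (c1 + 1) (c2 + 1) ((c1 * c1 + c2 * (c2 + 1)) % pvMOD) cnt 0 n = finB (loopB f c1 c2 cnt true n))
    ∧ (loopA f (c1 + 1) (c2 + 1) ((c1 * c1 + c2 * (c2 + 1)) % pvMOD) cnt 1 n = finB (loopB f c1 c2 cnt false n)) := by
  induction f with
  | zero => intro cnt n c1 c2 _; exact exit_eq c1 c2 n
  | succ f ih =>
    intro cnt n c1 c2 hcnt
    constructor
    · show loopA (f + 1) _ _ _ _ _ _ = _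
      unfold loopA loopB
      by_cases hle : cnt ≤ n
      · rw [if_pos hle, if_pos rfl, if_pos hle, if_pos rfl]
        have harg : c1 + 1 + cnt - 1 = c1 + cnt := by ring
        rw [harg]
        norm_num
        have htot : PySem.Int.mod ((c1 * c1 + c2 * (c2 + 1)) % pvMOD + firstSet (c1 + 1) (c1 + cnt)) pvMOD
            = ((c1 + cnt) * (c1 + cnt) + c2 * (c2 + 1)) % pvMOD := by
          rw [pvmod_emod]
          have hfs := fs_modeq (c1 + 1) (c1 + cnt) (by omega)
          calc ((c1 * c1 + c2 * (c2 + 1)) % pvMOD) + firstSet (c1 + 1) (c1 + cnt)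
              ≡ (c1 * c1 + c2 * (c2 + 1)) +
                ((c1 + cnt) * (c1 + cnt) - (c1 + 1 - 1) * (c1 + 1 - 1)) [ZMOD pvMOD] :=
                (hm _).add hfs
            _ = (c1 + cnt) * (c1 + cnt) + c2 * (c2 + 1) := by ring
        rw [htot]
        exact (ih (cnt * 2) (n - cnt) (c1 + cnt) c2 (by omega)).2
      · rw [if_neg hle, if_neg hle]
        exact (exit_eq c1 c2 n).1
    · show loopA (f + 1) _ _ _ _ _ _ = _
      unfold loopA loopB
      by_cases hle : cnt ≤ n
      · rw [if_pos hle, if_neg (by norm_num), if_pos hle]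
        simp only [Bool.false_eq_true, if_false]
        have harg : c2 + 1 + cnt - 1 = c2 + cnt := by ring
        rw [harg]
        norm_num
        have htot : PySem.Int.mod ((c1 * c1 + c2 * (c2 + 1)) % pvMOD + secondSet (c2 + 1) (c2 + cnt)) pvMOD
            = (c1 * c1 + (c2 + cnt) * ((c2 + cnt) + 1)) % pvMOD := by
          rw [pvmod_emod]
          have hss := ss_modeq (c2 + 1) (c2 + cnt) (by omega)
          calc ((c1 * c1 + c2 * (c2 + 1)) % pvMOD) + secondSet (c2 + 1) (c2 + cnt)
              ≡ (c1 * c1 + c2 * (c2 + 1)) +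
                ((c2 + cnt) * ((c2 + cnt) + 1) - (c2 + 1 - 1) * (c2 + 1)) [ZMOD pvMOD] :=
                (hm _).add hss
            _ = c1 * c1 + (c2 + cnt) * ((c2 + cnt) + 1) := by ring
        rw [htot]
        exact (ih (cnt * 2) (n - cnt) c1 (c2 + cnt) (by omega)).1
      · rw [if_neg hle, if_neg hle]
        exact (exit_eq c1 c2 n).2

-- ===== VERDICT (by name: the statement is the Claim_ definition above) =====
theorem solve_spec : Claim_equal_solve := by
  intro n _
  unfold Spec_solve solve
  rw [solve_alt_eq]
  have h := (loop_eq (n.toNat + 1) 1 n 0 0 (le_refl 1)).1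
  simpa using h
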